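-- pv_equiv track=rewrite | github.com/cirosantilli/project-euler-solvers | solvers/650.py | S
-- ===== SOURCE A (Python) =====
-- def divisor(pf, mod):
--     total = 1
--     for p in pf:
--         e = pf[p]
--         total *= (pow(p, e + 1, mod) - 1) * pow(p - 1, -1, mod) % mod
--     return total % mod
--
-- def prime_factors_sieve(limit):
--     result = [{} for _ in range(limit + 1)]
--     for i in range(2, limit + 1):
--         if len(result[i]) == 0:
--             # prime number found
--             for j in range(i, limit + 1, i):
--                 n = j
--                 if i in result[j]:
--                     while n % i == 0:
--                         n //= i
--                         result[j][i] += 1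
--                 else:
--                     result[j][i] = 1
--                     n //= i
--                     while n % i == 0:
--                         n //= i
--                         result[j][i] += 1
--     return result
--
-- def S(n):
--     if n == 1:
--         return 1
--     if n == 2:
--         return 4
--     # pre compute prime factors of all n
--     pf_array = prime_factors_sieve(n + 1)
--
--     # Precompute prime factors of n! iteratively
--     pf_fac = [{} for _ in range(n + 1)]
--     for x in range(2, n + 1):
--         pf_fac[x] = {}
--         for p in pf_fac[x - 1]:
--             pf_fac[x][p] = pf_fac[x - 1][p]
--         v = pf_array[x]
--         for p in v:
--             if p in pf_fac[x]:
--                 pf_fac[x][p] += v[p]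
--             else:
--                 pf_fac[x][p] = v[p]
--
--     mod = 10**9 + 7
--     B = {2: 1}
--
--     D = [0] * (n + 1)
--     D[1] = 1
--     D[2] = 3
--
--     for x in range(3, n + 1):
--         pf_x = pf_array[x]
--         for p in pf_x:
--             if p in B:
--                 B[p] += pf_x[p] * x
--             else:
--                 B[p] = pf_x[p] * x
--         lpf_x = pf_fac[x]
--         for p in lpf_x:
--             if p in B:
--                 B[p] -= lpf_x[p]
--             else:
--                 B[p] = lpf_x[p]
--         D[x] = divisor(B, mod)
--     return sum(D) % mod
-- ===== SOURCE B (Python) =====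
-- def prime_factors_sieve(limit):
--     result = [{} for _ in range(limit + 1)]
--     for i in range(2, limit + 1):
--         if len(result[i]) == 0:
--             # prime number found
--             for j in range(i, limit + 1, i):
--                 n = j
--                 if i in result[j]:
--                     while n % i == 0:
--                         n //= i
--                         result[j][i] += 1
--                 else:
--                     result[j][i] = 1
--                     n //= i
--                     while n % i == 0:
--                         n //= i
--                         result[j][i] += 1
--     return result
--
--
-- def S(n):
--     # Prime-major accumulation: B(x) = B(x-1) * x^x / x!, so the exponent of p
--     # in B(x) evolves by e_p += x*v_p(x) - v_p(x!).  For each prime p we walk x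
--     # once, keeping the running exponent, and multiply sigma's p-factor into a
--     # partial-product array; no per-x factorial-factorization dicts are kept.
--     mod = 10 ** 9 + 7
--     pf = prime_factors_sieve(n + 1)
--     primes = {}
--     for z in range(2, n + 1):
--         for p in pf[z]:
--             primes[p] = True
--     sig = [1] * (n + 1)
--     for p in primes:
--         c = 0  # v_p(x!)
--         e = 0  # exponent of p in B(x)
--         for x in range(p, n + 1):
--             v = pf[x].get(p, 0)
--             c += v
--             e += x * v - c
--             sig[x] = sig[x] * ((pow(p, e + 1, mod) - 1) * pow(p - 1, -1, mod) % mod) % mod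
--     return sum(sig[1:]) % mod
-- ===== Notes on version B (the rewrite author's own statement) =====
-- stated objective: alternative
-- what changed: B transposes the computation to prime-major: instead of maintaining a running factorial-factorization dict per x and recomputing the full divisor-sum product over an exponent dict at every x, it walks each prime once, carrying that prime's running v_p(x!) and B(x)-exponent, and multiplies the prime's sigma-factor into a partial-product array, summing the array at the end (the factor sieve helper is shared).
-- outside the precondition, e.g. on S(0): A raises IndexError, B returns 0
import Mathlib
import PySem

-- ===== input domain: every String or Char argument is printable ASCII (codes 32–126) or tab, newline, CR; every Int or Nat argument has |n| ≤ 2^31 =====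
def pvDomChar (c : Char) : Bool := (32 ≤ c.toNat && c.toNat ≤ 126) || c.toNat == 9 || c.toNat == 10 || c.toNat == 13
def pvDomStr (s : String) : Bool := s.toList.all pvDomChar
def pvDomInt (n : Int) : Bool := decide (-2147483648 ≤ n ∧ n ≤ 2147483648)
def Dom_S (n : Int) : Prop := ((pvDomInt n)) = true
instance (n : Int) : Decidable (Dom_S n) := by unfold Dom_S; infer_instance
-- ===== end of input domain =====

-- B replaces A's per-x factorial-factorization dicts and full divisor-product recomputation by a
-- prime-major accumulation of each prime's sigma-factor into a partial-product array (alternative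
-- decomposition of the same computation; both share the factor sieve helper).

-- ===== PORT A =====

-- list indexing / assignment: indices used by both programs are always in range (guards only
-- make the functions total; Python would raise IndexError outside them)
def pvGetd (xs : List (PySem.Dict Int Int)) (i : Int) : PySem.Dict Int Int :=
  (PySem.List.pyGet? xs i).getD PySem.Dict.empty

def pvGeti (xs : List Int) (i : Int) : Int := (PySem.List.pyGet? xs i).getD 0

-- pow(a, -1, m): modular inverse, exact when gcd(a, m) = 1 (Python raises otherwise; both
-- programs only invert p - 1 for p a sieve key, which is coprime to the prime modulus)
def pvInv (a m : Int) : Int := if Int.gcd a m = 1 then (Int.gcdA a m) % m else 0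

-- the per-prime factor (pow(p, e + 1, mod) - 1) * pow(p - 1, -1, mod) % mod  (e + 1 ≥ 0 in all runs)
def pvFactor (m p e : Int) : Int := ((PySem.Int.powMod p (e + 1).toNat m - 1) * pvInv (p - 1) m) % m

def pvDivisor (pf : PySem.Dict Int Int) (m : Int) : Int :=
  (pf.items.foldl (fun t pe => t * pvFactor m pe.1 pe.2) 1) % m

-- while n % i == 0: n //= i; result[j][i] += 1   (fuel n.toNat only guards termination:
-- with 2 ≤ i and 0 < n the loop runs at most log₂ n < n.toNat times, so it is never cut short)
def pvDivLoopAux (fuel : Nat) (i : Int) (n : Int) (d : PySem.Dict Int Int) : PySem.Dict Int Int :=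
  match fuel with
  | 0 => d
  | fuel + 1 =>
    if 2 ≤ i ∧ 0 < n ∧ PySem.Int.mod n i = 0 then
      pvDivLoopAux fuel i (PySem.Int.floordiv n i) (d.modify i 0 (· + 1))
    else d

def pvDivLoop (i : Int) (n : Int) (d : PySem.Dict Int Int) : PySem.Dict Int Int :=
  pvDivLoopAux n.toNat i n d

def pvSieveStep (limit i : Int) (res : List (PySem.Dict Int Int)) : List (PySem.Dict Int Int) :=
  (PySem.List.pyRange i (limit + 1) i).foldl (fun res j =>
      let d := pvGetd res j
      let d' := if d.contains i then pvDivLoop i j d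
                else pvDivLoop i (PySem.Int.floordiv j i) (d.insert i 1)
      PySem.List.pySetD res j d') res

def primeFactorsSieve (limit : Int) : List (PySem.Dict Int Int) :=
  (PySem.List.pyRange 2 (limit + 1) 1).foldl
    (fun res i => if (pvGetd res i).size = 0 then pvSieveStep limit i res else res)
    (List.replicate (limit + 1).toNat PySem.Dict.empty)

def S (n : Int) : Int :=
  if n = 1 then 1
  else if n = 2 then 4
  else
    let pfArray := primeFactorsSieve (n + 1)
    let pfFac := (PySem.List.pyRange 2 (n + 1) 1).foldl
      (fun fac x =>
        let copied := (pvGetd fac (x - 1)).items.foldl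
          (fun d pv => d.insert pv.1 pv.2) PySem.Dict.empty
        let merged := (pvGetd pfArray x).items.foldl
          (fun d pv => if d.contains pv.1 then d.modify pv.1 0 (· + pv.2) else d.insert pv.1 pv.2)
          copied
        PySem.List.pySetD fac x merged)
      (List.replicate (n + 1).toNat PySem.Dict.empty)
    let md : Int := 1000000007
    let B0 : PySem.Dict Int Int := PySem.Dict.empty.insert 2 1
    let D0 := PySem.List.pySetD (PySem.List.pySetD (List.replicate (n + 1).toNat (0 : Int)) 1 1) 2 3
    let fin := (PySem.List.pyRange 3 (n + 1) 1).foldl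
      (fun (st : PySem.Dict Int Int × List Int) x =>
        let B1 := (pvGetd pfArray x).items.foldl
          (fun B pv => if B.contains pv.1 then B.modify pv.1 0 (· + pv.2 * x) else B.insert pv.1 (pv.2 * x))
          st.1
        let B2 := (pvGetd pfFac x).items.foldl
          (fun B pv => if B.contains pv.1 then B.modify pv.1 0 (· - pv.2) else B.insert pv.1 pv.2)
          B1
        (B2, PySem.List.pySetD st.2 x (pvDivisor B2 md)))
      (B0, D0)
    PySem.Int.mod (fin.2.foldl (· + ·) 0) md

-- ===== PORT B =====

def S_alt (n : Int) : Int :=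
  let md : Int := 1000000007
  let pf := primeFactorsSieve (n + 1)
  let primes := (PySem.List.pyRange 2 (n + 1) 1).foldl
      (fun pr z => (pvGetd pf z).items.foldl (fun pr pv => pr.insert pv.1 true) pr)
      (PySem.Dict.empty : PySem.Dict Int Bool)
  let sig0 := List.replicate (n + 1).toNat (1 : Int)
  let sig := primes.keys.foldl (fun sig p =>
      ((PySem.List.pyRange p (n + 1) 1).foldl
         (fun (st : List Int × Int × Int) x =>
            let v := (pvGetd pf x).getD p 0
            let c := st.2.1 + v
            let e := st.2.2 + x * v - c
            (PySem.List.pySetD st.1 x (PySem.Int.mod (pvGeti st.1 x * pvFactor md p e) md), c, e))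
         (sig, 0, 0)).1) sig0
  PySem.Int.mod (((PySem.List.slice sig (some 1) none).foldl (· + ·) 0)) md

-- ===== PRECONDITION & SPEC =====
-- Pre_S excludes exactly n ≤ 0, where A raises IndexError (D[1] = 1 on a list shorter than 2).
def Pre_S (n : Int) : Prop := 1 ≤ n
instance (n : Int) : Decidable (Pre_S n) := by unfold Pre_S; infer_instance
def pvWitness_S : Int := 5

def Spec_S (n : Int) (out : Int) : Prop := out = S_alt n
instance (n : Int) (out : Int) : Decidable (Spec_S n out) := by unfold Spec_S; infer_instance

-- ===== CLAIM (what is proved, stated in full; the proofs are below) =====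
def Claim_equal_S : Prop := ∀ (n : Int), Dom_S n → Pre_S n → Spec_S n (S n)

-- ===== LEMMAS AND PROOFS =====

-- ---------- spec-level functions (proof helpers) ----------

def pvMod : Int := 1000000007

-- the multiplicity entry pf[z].get(p, 0)
def pvGe (pf : List (PySem.Dict Int Int)) (p z : Int) : Int := (pvGetd pf z).getD p 0

-- sum of pf[z].get(p,0) for z in [a, x]
def pvCsum (pf : List (PySem.Dict Int Int)) (p a x : Int) : Int :=
  ((PySem.List.pyRange a (x + 1) 1).map (pvGe pf p)).sum

-- the exponent of p in B(x) as maintained by program A's dict `B`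
def pvE (pf : List (PySem.Dict Int Int)) (p x : Int) : Int :=
  (if p = 2 ∧ 2 ≤ x then 1 else 0)
  + ((PySem.List.pyRange 3 (x + 1) 1).map (fun y => y * pvGe pf p y - pvCsum pf p 2 y)).sum

-- canonical increasing list of sieve "primes" up to x (self-keyed entries)
def pvPrimesUpTo (pf : List (PySem.Dict Int Int)) (x : Int) : List Int :=
  (PySem.List.pyRange 2 (x + 1) 1).filter (fun p => (pvGetd pf p).contains p)

-- p occurs as a key of some pf[z], 2 ≤ z ≤ x
def pvOcc (pf : List (PySem.Dict Int Int)) (p x : Int) : Prop :=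
  ∃ z, 2 ≤ z ∧ z ≤ x ∧ (pvGetd pf z).contains p = true

-- ---------- basic list-cell lemmas ----------

theorem pvGet_set {α : Type} (dflt : α) (xs : List α) (k : Int) (v : α) (j : Int)
    (hk0 : 0 ≤ k) (hj : 0 ≤ j) :
    (PySem.List.pyGet? (PySem.List.pySetD xs k v) j).getD dflt
      = if j = k ∧ k.toNat < xs.length then v else (PySem.List.pyGet? xs j).getD dflt := by
  rw [PySem.List.pySetD_of_nonneg xs v hk0, PySem.List.pyGet?_of_nonneg _ hj,
      PySem.List.pyGet?_of_nonneg _ hj, List.getElem?_set]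
  by_cases hjk : j = k
  · subst hjk
    simp only [if_pos rfl, true_and]
    by_cases hr : j.toNat < xs.length
    · simp [hr]
    · simp [hr, List.getElem?_eq_none (by omega : xs.length ≤ j.toNat)]
  · have hne : ¬ (k.toNat = j.toNat) := by omega
    simp [hne, hjk]

theorem pvGet_replicate {α : Type} (dflt c : α) (m : Nat) (j : Int) (hj : 0 ≤ j) :
    (PySem.List.pyGet? (List.replicate m c) j).getD dflt = if j.toNat < m then c else dflt := by
  rw [PySem.List.pyGet?_of_nonneg _ hj]
  by_cases h : j.toNat < m
  · simp [List.getElem?_replicate, h]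
  · simp [List.getElem?_replicate, h]

theorem pvFoldSet_length {α : Type} (l : List Int) (body : Int → List α → α) (res : List α) :
    (l.foldl (fun r i => PySem.List.pySetD r i (body i r)) res).length = res.length := by
  induction l generalizing res with
  | nil => rfl
  | cons i l ih => simp only [List.foldl_cons]; rw [ih, PySem.List.length_pySetD]

-- a fold that writes distinct nonnegative cells, each update reading only its own cell
theorem pvFoldSet {α : Type} (dflt : α) (l : List Int) (hl : l.Nodup) (body : Int → α → α)
    (res : List α) (j : Int) (hj : 0 ≤ j) (hpos : ∀ x ∈ l, 0 ≤ x) :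
    (PySem.List.pyGet?
        (l.foldl (fun r i => PySem.List.pySetD r i (body i ((PySem.List.pyGet? r i).getD dflt))) res)
        j).getD dflt
      = if j ∈ l ∧ j.toNat < res.length then body j ((PySem.List.pyGet? res j).getD dflt)
        else (PySem.List.pyGet? res j).getD dflt := by
  induction l generalizing res with
  | nil => simp
  | cons i l ih =>
    have hi0 : 0 ≤ i := hpos i (by simp)
    have hnotin : i ∉ l := by
      simp only [List.nodup_cons] at hl; exact hl.1
    simp only [List.foldl_cons]
    rw [ih hl.of_cons _ (fun x hx => hpos x (by simp [hx])), PySem.List.length_pySetD]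
    simp only [pvGet_set dflt res i _ j hi0 hj]
    by_cases hji : j = i
    · subst hji
      simp [hnotin]
    · simp [hji]

-- ---------- div-loop lemmas ----------

theorem pvDivLoopAux_keys (f : Nat) (i n : Int) (d : PySem.Dict Int Int)
    (h : d.contains i = true) : (pvDivLoopAux f i n d).keys = d.keys := by
  induction f generalizing n d with
  | zero => rfl
  | succ f ih =>
    unfold pvDivLoopAux
    split
    · rw [ih _ _ (by rw [PySem.Dict.contains_modify]; simp)]
      rw [PySem.Dict.keys_modify, PySem.Dict.keys_insert_of_contains _ _ h]
    · rfl

-- ---------- sieve-step characterization ----------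

theorem pvNodup_pyRange (a b : Int) {s : Int} (hs : 0 < s) : (PySem.List.pyRange a b s).Nodup := by
  rw [PySem.List.pyRange_of_pos a b hs]
  refine List.Nodup.map ?_ List.nodup_range
  intro x y h
  have : a + s * (x : Int) = a + s * (y : Int) := h
  have hxy : (x : Int) = y := by
    have := mul_left_cancel₀ (by omega : s ≠ 0) (by omega : s * (x:Int) = s * y)
    exact this
  exact_mod_cast hxy

theorem pvDict_empty_of_no_keys (d : PySem.Dict Int Int) (h : ∀ q, d.contains q = false) :
    d = PySem.Dict.empty := by
  have hit : d.items = [] := by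
    cases hd : d.items with
    | nil => rfl
    | cons p rest =>
      exfalso
      have hp : p ∈ d.items := by rw [hd]; simp
      have hm : p.1 ∈ d.keys := PySem.Dict.mem_keys_of_mem_items d hp
      have := (PySem.Dict.contains_iff_mem_keys d p.1).mpr hm
      rw [h p.1] at this
      cases this
  exact PySem.Dict.ext (by rw [hit]; rfl)

-- the body of the inner sieve loop for divisor i at cell j
def pvBody (i j : Int) (d : PySem.Dict Int Int) : PySem.Dict Int Int :=
  if d.contains i then pvDivLoop i j d
  else pvDivLoop i (PySem.Int.floordiv j i) (d.insert i 1)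

theorem pvBody_keys (i j : Int) (d : PySem.Dict Int Int) :
    (pvBody i j d).keys = if d.contains i then d.keys else d.keys ++ [i] := by
  unfold pvBody pvDivLoop
  by_cases h : d.contains i
  · rw [if_pos h, if_pos h, pvDivLoopAux_keys _ _ _ _ h]
  · rw [if_neg h, if_neg h, pvDivLoopAux_keys _ _ _ _ (PySem.Dict.contains_insert_self d i 1),
        PySem.Dict.keys_insert_of_not_contains d 1 (by rw [Bool.not_eq_true] at h; exact h)]

theorem pvBody_contains (i j q : Int) (d : PySem.Dict Int Int) :
    ((pvBody i j d).contains q = true) ↔ (d.contains q = true ∨ q = i) := by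
  rw [PySem.Dict.contains_iff_mem_keys, pvBody_keys]
  by_cases h : d.contains i
  · rw [if_pos h, ← PySem.Dict.contains_iff_mem_keys]
    constructor
    · exact Or.inl
    · rintro (hc | rfl)
      · exact hc
      · exact h
  · rw [if_neg h]
    simp [← PySem.Dict.contains_iff_mem_keys]

theorem pvBody_nodup (i j : Int) (d : PySem.Dict Int Int) (h : d.keys.Nodup) :
    (pvBody i j d).keys.Nodup := by
  rw [pvBody_keys]
  by_cases hc : d.contains i
  · rw [if_pos hc]; exact h
  · rw [if_neg hc]
    have hni : i ∉ d.keys := by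
      intro hm
      exact hc ((PySem.Dict.contains_iff_mem_keys d i).mpr hm)
    exact List.Nodup.append h (List.nodup_singleton i)
      (by intro a ha hb; rw [List.mem_singleton] at hb; subst hb; exact hni ha)

theorem pvSieveStep_get (L i : Int) (res : List (PySem.Dict Int Int)) (hi : 2 ≤ i)
    (j : Int) (hj : 0 ≤ j) :
    pvGetd (pvSieveStep L i res) j =
      if i ≤ j ∧ j < L + 1 ∧ i ∣ j ∧ j.toNat < res.length then pvBody i j (pvGetd res j)
      else pvGetd res j := by
  have hnd : (PySem.List.pyRange i (L + 1) i).Nodup := pvNodup_pyRange _ _ (by omega)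
  have hpos : ∀ x ∈ PySem.List.pyRange i (L + 1) i, 0 ≤ x := by
    intro x hx
    have := (PySem.List.mem_pyRange_iff_of_pos (by omega : (0:Int) < i) x).mp hx
    omega
  have hdvd : ∀ x : Int, i ∣ x - i ↔ i ∣ x := by
    intro x
    constructor
    · intro h; have := dvd_add h (dvd_refl i); simpa using this
    · intro h; exact dvd_sub h (dvd_refl i)
  show (PySem.List.pyGet? ((PySem.List.pyRange i (L + 1) i).foldl
      (fun r jj => PySem.List.pySetD r jj (pvBody i jj ((PySem.List.pyGet? r jj).getD PySem.Dict.empty))) res) j).getD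
      PySem.Dict.empty = _
  rw [pvFoldSet PySem.Dict.empty _ hnd (pvBody i) res j hj hpos]
  have hiff : (j ∈ PySem.List.pyRange i (L + 1) i ∧ j.toNat < res.length)
      ↔ (i ≤ j ∧ j < L + 1 ∧ i ∣ j ∧ j.toNat < res.length) := by
    rw [PySem.List.mem_pyRange_iff_of_pos (by omega : (0:Int) < i), hdvd]
    tauto
  by_cases hc : i ≤ j ∧ j < L + 1 ∧ i ∣ j ∧ j.toNat < res.length
  · rw [if_pos (hiff.mpr hc), if_pos hc]; rfl
  · rw [if_neg (fun hh => hc (hiff.mp hh)), if_neg hc]; rfl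


-- ---------- sieve loop invariant ----------

theorem pvGetd_replicate_empty (m : Nat) (j : Int) (hj : 0 ≤ j) :
    pvGetd (List.replicate m PySem.Dict.empty) j = PySem.Dict.empty := by
  show (PySem.List.pyGet? _ _).getD _ = _
  rw [pvGet_replicate _ _ _ _ hj]
  split <;> rfl

theorem pvSieveStep_length (L i : Int) (res : List (PySem.Dict Int Int)) :
    (pvSieveStep L i res).length = res.length := by
  show ((PySem.List.pyRange i (L + 1) i).foldl
    (fun r j => PySem.List.pySetD r j (pvBody i j (pvGetd r j))) res).length = res.length
  exact pvFoldSet_length _ (fun j r => pvBody i j (pvGetd r j)) res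

def pvSieveInv (L t : Int) (res : List (PySem.Dict Int Int)) : Prop :=
  res.length = (L + 1).toNat ∧
  (∀ j q : Int, 0 ≤ j → (pvGetd res j).contains q = true →
      2 ≤ q ∧ q ≤ j ∧ q < t ∧ (pvGetd res q).contains q = true) ∧
  (∀ j : Int, 0 ≤ j → (pvGetd res j).keys.Nodup) ∧
  (2 < t → 2 ≤ L → pvGetd res 2 = PySem.Dict.empty.insert 2 1)

theorem pvSieveInv_base (L : Int) :
    pvSieveInv L 2 (List.replicate (L + 1).toNat PySem.Dict.empty) := by
  refine ⟨by simp, ?_, ?_, fun h => absurd h (by omega)⟩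
  · intro j q hj hc
    rw [pvGetd_replicate_empty _ _ hj, PySem.Dict.contains_empty] at hc
    cases hc
  · intro j hj
    rw [pvGetd_replicate_empty _ _ hj, PySem.Dict.keys_empty]
    exact List.nodup_nil

theorem pvSieveInv_step (L t : Int) (res : List (PySem.Dict Int Int))
    (h : pvSieveInv L t res) (ht : 2 ≤ t) (htL : t < L + 1) :
    pvSieveInv L (t + 1) (if (pvGetd res t).size = 0 then pvSieveStep L t res else res) := by
  obtain ⟨hlen, hkey, hnd, h2⟩ := h
  by_cases hs : (pvGetd res t).size = 0
  · rw [if_pos hs]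
    have hget : ∀ j : Int, 0 ≤ j → pvGetd (pvSieveStep L t res) j =
        if t ≤ j ∧ j < L + 1 ∧ t ∣ j then pvBody t j (pvGetd res j) else pvGetd res j := by
      intro j hj
      rw [pvSieveStep_get L t res ht j hj]
      by_cases hc : t ≤ j ∧ j < L + 1 ∧ t ∣ j
      · rw [if_pos ⟨hc.1, hc.2.1, hc.2.2, by rw [hlen]; omega⟩, if_pos hc]
      · rw [if_neg (by tauto), if_neg hc]
    have huntouched : ∀ q : Int, 0 ≤ q → q < t → pvGetd (pvSieveStep L t res) q = pvGetd res q := by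
      intro q hq hqt
      rw [hget q hq, if_neg (fun hcc => absurd hcc.1 (by omega : ¬ t ≤ q))]
    refine ⟨by rw [pvSieveStep_length]; exact hlen, ?_, ?_, ?_⟩
    · intro j q hj hc
      rw [hget j hj] at hc
      have hcontStt : (pvGetd (pvSieveStep L t res) t).contains t = true := by
        rw [hget t (by omega), if_pos ⟨le_refl t, htL, dvd_refl t⟩]
        exact (pvBody_contains t t t _).mpr (Or.inr rfl)
      by_cases htouch : t ≤ j ∧ j < L + 1 ∧ t ∣ j
      · rw [if_pos htouch] at hc
        rcases (pvBody_contains t j q _).mp hc with hold | rfl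
        · have hp := hkey j q hj hold
          refine ⟨hp.1, hp.2.1, by omega, ?_⟩
          rw [huntouched q (by omega) hp.2.2.1]
          exact hp.2.2.2
        · exact ⟨ht, htouch.1, by omega, hcontStt⟩
      · rw [if_neg htouch] at hc
        have hp := hkey j q hj hc
        refine ⟨hp.1, hp.2.1, by omega, ?_⟩
        rw [huntouched q (by omega) hp.2.2.1]
        exact hp.2.2.2
    · intro j hj
      rw [hget j hj]
      by_cases htouch : t ≤ j ∧ j < L + 1 ∧ t ∣ j
      · rw [if_pos htouch]; exact pvBody_nodup _ _ _ (hnd j hj)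
      · rw [if_neg htouch]; exact hnd j hj
    · intro h2t hL2
      rcases lt_or_eq_of_le ht with h2lt | h2eq
      · rw [huntouched 2 (by omega) (by omega)]
        exact h2 h2lt hL2
      · have ht2 : t = 2 := h2eq.symm
        subst ht2
        rw [hget 2 (by omega), if_pos ⟨by omega, by omega, by norm_num⟩]
        have hempty : pvGetd res 2 = PySem.Dict.empty := by
          apply pvDict_empty_of_no_keys
          intro q
          by_contra hcq
          rw [Bool.not_eq_false] at hcq
          have := hkey 2 q (by omega) hcq
          omega
        rw [hempty]
        decide
  · rw [if_neg hs]
    refine ⟨hlen, ?_, hnd, ?_⟩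
    · intro j q hj hc
      have := hkey j q hj hc
      exact ⟨this.1, this.2.1, by omega, this.2.2.2⟩
    · intro h2t hL2
      rcases lt_or_eq_of_le ht with h2lt | h2eq
      · exact h2 h2lt hL2
      · exfalso
        apply hs
        have hempty : pvGetd res t = PySem.Dict.empty := by
          apply pvDict_empty_of_no_keys
          intro q
          by_contra hcq
          rw [Bool.not_eq_false] at hcq
          have := hkey t q (by omega) hcq
          omega
        rw [hempty]
        rfl


theorem pvSieve_facts (L : Int) : pvSieveInv L (L + 1) (primeFactorsSieve L) := by
  have main : ∀ m : Int, 2 ≤ m → m ≤ L + 1 →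
      pvSieveInv L m ((PySem.List.pyRange 2 m 1).foldl
        (fun res i => if (pvGetd res i).size = 0 then pvSieveStep L i res else res)
        (List.replicate (L + 1).toNat PySem.Dict.empty)) := by
    intro m hm
    induction m, hm using Int.le_induction with
    | base =>
      intro _
      rw [PySem.List.pyRange_one_eq_nil (by omega)]
      exact pvSieveInv_base L
    | succ m hm ih =>
      intro hmL
      rw [PySem.List.pyRange_one_succ_right (by omega : (2:Int) ≤ m), List.foldl_append]
      simp only [List.foldl_cons, List.foldl_nil]
      exact pvSieveInv_step L m _ (ih (by omega)) hm (by omega)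
  by_cases hL : 2 ≤ L + 1
  · exact main (L + 1) hL (le_refl _)
  · show pvSieveInv L (L + 1) ((PySem.List.pyRange 2 (L + 1) 1).foldl _ _)
    rw [PySem.List.pyRange_one_eq_nil (by omega)]
    have hbase := pvSieveInv_base L
    refine ⟨hbase.1, ?_, hbase.2.2.1, fun h => absurd h (by omega)⟩
    intro j q hj hc
    have := hbase.2.1 j q hj hc
    omega

-- ---------- generic "upsert" loops (add-or-insert over a dict) ----------

def pvUpsert (f : Int × Int → Int → Int) (g : Int × Int → Int)
    (B : PySem.Dict Int Int) (l : List (Int × Int)) : PySem.Dict Int Int :=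
  l.foldl (fun B pv => if B.contains pv.1 then B.modify pv.1 0 (f pv) else B.insert pv.1 (g pv)) B

theorem pvUpsert_nodup (f : Int × Int → Int → Int) (g : Int × Int → Int)
    (l : List (Int × Int)) (B : PySem.Dict Int Int) (hB : B.keys.Nodup) :
    (pvUpsert f g B l).keys.Nodup := by
  induction l generalizing B with
  | nil => exact hB
  | cons pv t ih =>
    show (pvUpsert f g _ t).keys.Nodup
    apply ih
    beta_reduce
    by_cases hc : B.contains pv.1
    · rw [if_pos hc, PySem.Dict.keys_modify, PySem.Dict.keys_insert_of_contains _ _ hc]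
      exact hB
    · rw [if_neg hc]
      exact PySem.Dict.nodup_keys_insert _ _ _ hB

theorem pvUpsert_contains (f : Int × Int → Int → Int) (g : Int × Int → Int)
    (l : List (Int × Int)) (B : PySem.Dict Int Int) (p : Int) :
    (pvUpsert f g B l).contains p = (B.contains p || decide (p ∈ l.map Prod.fst)) := by
  induction l generalizing B with
  | nil => simp [pvUpsert]
  | cons pv t ih =>
    show (pvUpsert f g _ t).contains p = _
    rw [ih]
    beta_reduce
    have hstep : (if B.contains pv.1 then B.modify pv.1 0 (f pv) else B.insert pv.1 (g pv)).contains p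
        = (p == pv.1 || B.contains p) := by
      by_cases hc : B.contains pv.1
      · rw [if_pos hc, PySem.Dict.contains_modify]
      · rw [if_neg hc, PySem.Dict.contains_insert]
    rw [hstep]
    by_cases hpp : p = pv.1
    · subst hpp; simp [List.mem_cons]
    · have hfalse : (p == pv.1) = false := by simp [hpp]
      rw [hfalse]
      simp only [Bool.false_or]
      congr 1
      exact decide_eq_decide.mpr (by simp [List.mem_cons, hpp])

theorem pvUpsert_getD_not_mem (f : Int × Int → Int → Int) (g : Int × Int → Int)
    (l : List (Int × Int)) (B : PySem.Dict Int Int) (p : Int)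
    (hp : p ∉ l.map Prod.fst) :
    (pvUpsert f g B l).getD p 0 = B.getD p 0 := by
  induction l generalizing B with
  | nil => rfl
  | cons pv t ih =>
    have hne : p ≠ pv.1 := by
      intro h; exact hp (by simp [h])
    show (pvUpsert f g _ t).getD p 0 = _
    rw [ih _ (fun h => hp (by simp at h ⊢; exact Or.inr h))]
    beta_reduce
    by_cases hc : B.contains pv.1
    · rw [if_pos hc, PySem.Dict.getD_modify]
      rw [if_neg hne]
    · rw [if_neg hc, PySem.Dict.getD_insert_of_ne _ _ _ hne]

theorem pvUpsert_getD_mem (f : Int × Int → Int → Int) (g : Int × Int → Int)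
    (l : List (Int × Int)) (hl : (l.map Prod.fst).Nodup) (B : PySem.Dict Int Int)
    (p : Int) (v : Int) (hpv : (p, v) ∈ l) :
    (pvUpsert f g B l).getD p 0
      = if B.contains p then f (p, v) (B.getD p 0) else g (p, v) := by
  induction l generalizing B with
  | nil => cases hpv
  | cons pv t ih =>
    rcases List.mem_cons.mp hpv with heq | hmem
    · have hpfst : p = pv.1 := by rw [← heq]
      have hnot : p ∉ t.map Prod.fst := by
        rw [List.map_cons, List.nodup_cons] at hl
        rw [hpfst]; exact hl.1
      show (pvUpsert f g _ t).getD p 0 = _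
      rw [pvUpsert_getD_not_mem f g t _ p hnot, ← heq]
      beta_reduce
      by_cases hc : B.contains p
      · rw [if_pos (by simpa using hc), if_pos hc, PySem.Dict.getD_modify, if_pos rfl]
      · rw [if_neg (by simpa using hc), if_neg hc]
        show (B.insert p (g (p, v))).getD p 0 = g (p, v)
        rw [PySem.Dict.getD_insert, if_pos rfl]
    · have hpt : p ∈ t.map Prod.fst := by
        exact List.mem_map.mpr ⟨(p, v), hmem, rfl⟩
      have hne : p ≠ pv.1 := by
        rw [List.map_cons, List.nodup_cons] at hl
        intro h; rw [← h] at hl; exact hl.1 hpt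
      show (pvUpsert f g _ t).getD p 0 = _
      have hcont : (if B.contains pv.1 then B.modify pv.1 0 (f pv) else B.insert pv.1 (g pv)).contains p
          = B.contains p := by
        by_cases hc : B.contains pv.1
        · rw [if_pos hc, PySem.Dict.contains_modify]
          simp [hne]
        · rw [if_neg hc, PySem.Dict.contains_insert]
          simp [hne]
      have hgd : (if B.contains pv.1 then B.modify pv.1 0 (f pv) else B.insert pv.1 (g pv)).getD p 0
          = B.getD p 0 := by
        by_cases hc : B.contains pv.1
        · rw [if_pos hc, PySem.Dict.getD_modify, if_neg hne]
        · rw [if_neg hc, PySem.Dict.getD_insert_of_ne _ _ _ hne]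
      rw [ih (by rw [List.map_cons, List.nodup_cons] at hl; exact hl.2) _ hmem]
      beta_reduce
      rw [hcont, hgd]


-- ---------- sums over integer ranges ----------

theorem pvSum_succ (f : Int → Int) (a x : Int) (h : a ≤ x) :
    ((PySem.List.pyRange a (x + 1) 1).map f).sum
      = ((PySem.List.pyRange a x 1).map f).sum + f x := by
  rw [PySem.List.pyRange_one_succ_right h]
  simp

theorem pvSum_zero (f : Int → Int) (a x : Int) (h : ∀ y, a ≤ y → y ≤ x → f y = 0) :
    ((PySem.List.pyRange a (x + 1) 1).map f).sum = 0 := by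
  apply List.sum_eq_zero
  intro z hz
  rcases List.mem_map.mp hz with ⟨y, hy, rfl⟩
  have := (PySem.List.mem_pyRange_one).mp hy
  exact h y this.1 (by omega)

theorem pvCsum_succ (pf : List (PySem.Dict Int Int)) (p a x : Int) (h : a ≤ x) :
    pvCsum pf p a x = pvCsum pf p a (x - 1) + pvGe pf p x := by
  unfold pvCsum
  have hx : x - 1 + 1 = x := by ring
  rw [hx, pvSum_succ _ _ _ h]

theorem pvCsum_zero (pf : List (PySem.Dict Int Int)) (p a x : Int)
    (h : ∀ y, a ≤ y → y ≤ x → pvGe pf p y = 0) : pvCsum pf p a x = 0 :=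
  pvSum_zero _ _ _ h

theorem pvCsum_split (pf : List (PySem.Dict Int Int)) (p a m x : Int)
    (h1 : a ≤ m) (h2 : m ≤ x + 1) :
    pvCsum pf p a x = pvCsum pf p a (m - 1) + pvCsum pf p m x := by
  unfold pvCsum
  have hm : m - 1 + 1 = m := by ring
  rw [hm, PySem.List.pyRange_one_append a m (x + 1) h1 h2, List.map_append, List.sum_append]

theorem pvE_succ (pf : List (PySem.Dict Int Int)) (p x : Int) (h : 3 ≤ x) :
    pvE pf p x = pvE pf p (x - 1) + (x * pvGe pf p x - pvCsum pf p 2 x) := by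
  unfold pvE
  have hx : x - 1 + 1 = x := by ring
  rw [hx, pvSum_succ _ _ _ h]
  have : (p = 2 ∧ 2 ≤ x) ↔ (p = 2 ∧ 2 ≤ x - 1) := by constructor <;> (rintro ⟨hp, _⟩; exact ⟨hp, by omega⟩)
  rcases Classical.em (p = 2) with hp | hp
  · subst hp
    rw [if_pos ⟨rfl, by omega⟩, if_pos ⟨rfl, by omega⟩]
    ring
  · rw [if_neg (by tauto), if_neg (by tauto)]
    ring

theorem pvE_two (pf : List (PySem.Dict Int Int)) (p : Int) :
    pvE pf p 2 = if p = 2 then 1 else 0 := by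
  unfold pvE
  rw [PySem.List.pyRange_one_eq_nil (by omega)]
  rcases Classical.em (p = 2) with hp | hp
  · rw [if_pos ⟨hp, by omega⟩, if_pos hp]; rfl
  · rw [if_neg (by tauto), if_neg hp]; rfl

theorem pvE_zero (pf : List (PySem.Dict Int Int)) (p x : Int)
    (hg : ∀ y, 0 ≤ y → y < p → pvGe pf p y = 0) (hx : x < p) (hx0 : 2 ≤ p) (h2 : p = 2 → x < 2) :
    pvE pf p x = 0 := by
  unfold pvE
  have hind : ¬ (p = 2 ∧ 2 ≤ x) := by
    rintro ⟨hp, hc⟩; have := h2 hp; omega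
  rw [if_neg hind]
  have : ((PySem.List.pyRange 3 (x + 1) 1).map (fun y => y * pvGe pf p y - pvCsum pf p 2 y)).sum = 0 := by
    apply pvSum_zero
    intro y h3 hy
    have hgy : pvGe pf p y = 0 := hg y (by omega) (by omega)
    have hcs : pvCsum pf p 2 y = 0 := pvCsum_zero pf p 2 y (fun z hz1 hz2 => hg z (by omega) (by omega))
    simp [hgy, hcs]
  rw [this]
  simp

-- ---------- small dict helpers ----------

theorem pvMem_items_getD (d : PySem.Dict Int Int) (hnd : d.keys.Nodup) (p : Int)
    (hc : d.contains p = true) : (p, d.getD p 0) ∈ d.items := by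
  rw [PySem.Dict.items_eq_map_keys d hnd 0]
  exact List.mem_map.mpr ⟨p, (PySem.Dict.contains_iff_mem_keys d p).mp hc, rfl⟩

theorem pvCopy_eq (d : PySem.Dict Int Int) (hnd : d.keys.Nodup) :
    d.items.foldl (fun a pv => a.insert pv.1 pv.2) PySem.Dict.empty = d := by
  apply PySem.Dict.ext
  have h := PySem.Dict.items_foldl_insert_fresh d.items Prod.fst Prod.snd PySem.Dict.empty
    (fun a _ => PySem.Dict.contains_empty _) (by
      have : d.items.map Prod.fst = d.keys := rfl
      rw [this]; exact hnd)
  have h2 : (List.foldl (fun dd a => dd.insert a.1 a.2) PySem.Dict.empty d.items).items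
      = PySem.Dict.empty.items ++ List.map (fun a => (a.1, a.2)) d.items := h
  rw [h2]
  have hemp : PySem.Dict.empty.items = ([] : List (Int × Int)) := rfl
  rw [hemp]
  simp

-- ---------- proof-side mirrors of the two pipelines ----------

def pvPF (n : Int) : List (PySem.Dict Int Int) := primeFactorsSieve (n + 1)

def pvFacStep (n : Int) (fac : List (PySem.Dict Int Int)) (x : Int) : List (PySem.Dict Int Int) :=
  PySem.List.pySetD fac x
    (pvUpsert (fun pv w => w + pv.2) (fun pv => pv.2)
      ((pvGetd fac (x - 1)).items.foldl (fun d pv => d.insert pv.1 pv.2) PySem.Dict.empty)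
      (pvGetd (pvPF n) x).items)

def pvFAC (n : Int) : List (PySem.Dict Int Int) :=
  (PySem.List.pyRange 2 (n + 1) 1).foldl (pvFacStep n)
    (List.replicate (n + 1).toNat PySem.Dict.empty)

def pvMainStep (n : Int) (st : PySem.Dict Int Int × List Int) (x : Int) :
    PySem.Dict Int Int × List Int :=
  let B1 := pvUpsert (fun pv w => w + pv.2 * x) (fun pv => pv.2 * x) st.1 (pvGetd (pvPF n) x).items
  let B2 := pvUpsert (fun pv w => w - pv.2) (fun pv => pv.2) B1 (pvGetd (pvFAC n) x).items
  (B2, PySem.List.pySetD st.2 x (pvDivisor B2 1000000007))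

def pvMain (n : Int) : PySem.Dict Int Int × List Int :=
  (PySem.List.pyRange 3 (n + 1) 1).foldl (pvMainStep n)
    (PySem.Dict.empty.insert 2 1,
     PySem.List.pySetD (PySem.List.pySetD (List.replicate (n + 1).toNat (0 : Int)) 1 1) 2 3)

theorem pvS_eq (n : Int) (h1 : ¬ n = 1) (h2 : ¬ n = 2) :
    S n = PySem.Int.mod ((pvMain n).2.foldl (· + ·) 0) 1000000007 := by
  simp only [S, if_neg h1, if_neg h2]
  rfl

def pvPrimesDict (n : Int) : PySem.Dict Int Bool :=
  (PySem.List.pyRange 2 (n + 1) 1).foldl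
    (fun pr z => (pvGetd (pvPF n) z).items.foldl (fun pr pv => pr.insert pv.1 true) pr)
    PySem.Dict.empty

def pvInnerStep (n p : Int) (st : List Int × Int × Int) (x : Int) : List Int × Int × Int :=
  let v := (pvGetd (pvPF n) x).getD p 0
  let c := st.2.1 + v
  let e := st.2.2 + x * v - c
  (PySem.List.pySetD st.1 x
      (PySem.Int.mod (pvGeti st.1 x * pvFactor 1000000007 p e) 1000000007), c, e)

def pvSig (n : Int) : List Int :=
  (pvPrimesDict n).keys.foldl
    (fun sig p => ((PySem.List.pyRange p (n + 1) 1).foldl (pvInnerStep n p) (sig, 0, 0)).1)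
    (List.replicate (n + 1).toNat 1)

theorem pvSalt_eq (n : Int) :
    S_alt n = PySem.Int.mod ((PySem.List.slice (pvSig n) (some 1) none).foldl (· + ·) 0) 1000000007 := by
  simp only [S_alt]
  rfl


-- ---------- facts about A's factorial-factorization array pf_fac ----------

theorem pvFAC_facts (n : Int) (hn : 3 ≤ n) :
    ∀ x : Int, 0 ≤ x → x ≤ n →
      ((pvGetd (pvFAC n) x).keys.Nodup ∧
       (∀ p, (pvGetd (pvFAC n) x).contains p = true ↔ (2 ≤ x ∧ pvOcc (pvPF n) p x)) ∧
       (∀ p, (pvGetd (pvFAC n) x).getD p 0 = pvCsum (pvPF n) p 2 x)) := by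
  obtain ⟨hlenPF, hkeyPF, hndPF, h2PF⟩ := pvSieve_facts (n + 1)
  have hg0 : ∀ p y : Int, 0 ≤ y → (pvGetd (pvPF n) y).contains p = false → pvGe (pvPF n) p y = 0 := by
    intro p y _ hc
    exact PySem.Dict.getD_of_not_contains _ _ hc
  have main : ∀ m : Int, 2 ≤ m → m ≤ n + 1 →
      (((PySem.List.pyRange 2 m 1).foldl (pvFacStep n)
          (List.replicate (n + 1).toNat PySem.Dict.empty)).length = (n + 1).toNat ∧
       (∀ x : Int, 0 ≤ x → 2 ≤ x → x < m →
         ((pvGetd ((PySem.List.pyRange 2 m 1).foldl (pvFacStep n)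
             (List.replicate (n + 1).toNat PySem.Dict.empty)) x).keys.Nodup ∧
          (∀ p, (pvGetd ((PySem.List.pyRange 2 m 1).foldl (pvFacStep n)
             (List.replicate (n + 1).toNat PySem.Dict.empty)) x).contains p = true
              ↔ (2 ≤ x ∧ pvOcc (pvPF n) p x)) ∧
          (∀ p, (pvGetd ((PySem.List.pyRange 2 m 1).foldl (pvFacStep n)
             (List.replicate (n + 1).toNat PySem.Dict.empty)) x).getD p 0 = pvCsum (pvPF n) p 2 x))) ∧
       (∀ x : Int, 0 ≤ x → (x < 2 ∨ m ≤ x) →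
          pvGetd ((PySem.List.pyRange 2 m 1).foldl (pvFacStep n)
            (List.replicate (n + 1).toNat PySem.Dict.empty)) x = PySem.Dict.empty)) := by
    intro m hm
    induction m, hm using Int.le_induction with
    | base =>
      intro _
      rw [PySem.List.pyRange_one_eq_nil (by omega)]
      refine ⟨by simp, ?_, ?_⟩
      · intro x _ _ hx2; omega
      · intro x hx _
        exact pvGetd_replicate_empty _ _ hx
    | succ m hm ih =>
      intro hmn
      obtain ⟨ihlen, ihprops, ihempty⟩ := ih (by omega)
      rw [PySem.List.pyRange_one_succ_right (by omega : (2:Int) ≤ m), List.foldl_append,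
          List.foldl_cons, List.foldl_nil]
      set fac := (PySem.List.pyRange 2 m 1).foldl (pvFacStep n)
        (List.replicate (n + 1).toNat PySem.Dict.empty) with hfac
      -- the previous row
      have hprevNodup : (pvGetd fac (m - 1)).keys.Nodup := by
        rcases Classical.em (m = 2) with h | h
        · rw [h, show ((2:Int) - 1) = 1 by ring]
          rw [ihempty 1 (by omega) (by omega), PySem.Dict.keys_empty]
          exact List.nodup_nil
        · exact (ihprops (m - 1) (by omega) (by omega) (by omega)).1
      have hprevCont : ∀ p, (pvGetd fac (m - 1)).contains p = true ↔ (2 ≤ m - 1 ∧ pvOcc (pvPF n) p (m - 1)) := by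
        rcases Classical.em (m = 2) with h | h
        · intro p
          rw [h, show ((2:Int) - 1) = 1 by ring]
          rw [ihempty 1 (by omega) (by omega), PySem.Dict.contains_empty]
          constructor
          · intro hc; cases hc
          · intro hc; omega
        · exact (ihprops (m - 1) (by omega) (by omega) (by omega)).2.1
      have hprevGetD : ∀ p, (pvGetd fac (m - 1)).getD p 0 = pvCsum (pvPF n) p 2 (m - 1) := by
        rcases Classical.em (m = 2) with h | h
        · intro p
          rw [h, show ((2:Int) - 1) = 1 by ring]
          rw [ihempty 1 (by omega) (by omega)]
          rw [pvCsum, PySem.List.pyRange_one_eq_nil (by omega)]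
          rfl
        · exact (ihprops (m - 1) (by omega) (by omega) (by omega)).2.2
      -- the merged dict written at row m
      have hcopy : (pvGetd fac (m - 1)).items.foldl (fun d pv => d.insert pv.1 pv.2) PySem.Dict.empty
          = pvGetd fac (m - 1) := pvCopy_eq _ hprevNodup
      have hndfst : ((pvGetd (pvPF n) m).items.map Prod.fst).Nodup := hndPF m (by omega)
      set M := pvUpsert (fun pv w => w + pv.2) (fun pv => pv.2)
        ((pvGetd fac (m - 1)).items.foldl (fun d pv => d.insert pv.1 pv.2) PySem.Dict.empty)
        (pvGetd (pvPF n) m).items with hM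
      have hMnodup : M.keys.Nodup := by
        rw [hM, hcopy]
        exact pvUpsert_nodup _ _ _ _ hprevNodup
      have hkeysfst : ∀ p : Int, p ∈ (pvGetd (pvPF n) m).items.map Prod.fst
          ↔ (pvGetd (pvPF n) m).contains p = true := by
        intro p
        rw [PySem.Dict.contains_iff_mem_keys]
        rfl
      have hMcont : ∀ p, M.contains p = true ↔ (2 ≤ m ∧ pvOcc (pvPF n) p m) := by
        intro p
        rw [hM, hcopy, pvUpsert_contains]
        rw [Bool.or_eq_true, decide_eq_true_iff, hkeysfst, hprevCont]
        constructor
        · rintro (⟨_, z, hz1, hz2, hz3⟩ | hc)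
          · exact ⟨by omega, z, hz1, by omega, hz3⟩
          · exact ⟨by omega, m, by omega, le_refl m, hc⟩
        · rintro ⟨_, z, hz1, hz2, hz3⟩
          rcases Classical.em (z = m) with rfl | hne
          · exact Or.inr hz3
          · exact Or.inl ⟨by
              rcases hkeyPF z p (by omega) hz3 with ⟨hq1, hq2, _, _⟩
              omega, z, hz1, by omega, hz3⟩
      have hCprev0 : ∀ p, (pvGetd fac (m - 1)).contains p = false → pvCsum (pvPF n) p 2 (m - 1) = 0 := by
        intro p hc
        have hniff := hprevCont p
        rw [hc] at hniff
        have hno : ¬ (2 ≤ m - 1 ∧ pvOcc (pvPF n) p (m - 1)) := by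
          intro hx
          exact absurd (hniff.mpr hx) (by simp)
        rcases Classical.em (2 ≤ m - 1) with h21 | h21
        · apply pvCsum_zero
          intro y hy1 hy2
          apply hg0 p y (by omega)
          by_contra hcc
          rw [Bool.not_eq_false] at hcc
          exact hno ⟨h21, y, hy1, hy2, hcc⟩
        · rw [pvCsum, PySem.List.pyRange_one_eq_nil (by omega)]
          rfl
      have hMgetD : ∀ p, M.getD p 0 = pvCsum (pvPF n) p 2 m := by
        intro p
        rcases Classical.em ((pvGetd (pvPF n) m).contains p = true) with hpm | hpm
        · have hv : (p, pvGe (pvPF n) p m) ∈ (pvGetd (pvPF n) m).items :=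
            pvMem_items_getD _ (hndPF m (by omega)) p hpm
          rw [hM, hcopy, pvUpsert_getD_mem _ _ _ hndfst _ _ _ hv]
          rw [pvCsum_succ _ _ _ _ (by omega : (2:Int) ≤ m)]
          by_cases hc : (pvGetd fac (m - 1)).contains p
          · rw [if_pos hc, hprevGetD p]
          · rw [if_neg hc, hCprev0 p (by rw [Bool.not_eq_true] at hc; exact hc)]
            ring
        · have hnm : p ∉ (pvGetd (pvPF n) m).items.map Prod.fst := by
            rw [hkeysfst]; exact hpm
          rw [hM, hcopy, pvUpsert_getD_not_mem _ _ _ _ _ hnm, hprevGetD p]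
          rw [pvCsum_succ _ _ _ _ (by omega : (2:Int) ≤ m),
              hg0 p m (by omega) (by rw [Bool.not_eq_true] at hpm; exact hpm)]
          ring
      -- the write itself
      have hsetget : ∀ y : Int, 0 ≤ y → pvGetd (pvFacStep n fac m) y
          = if y = m then M else pvGetd fac y := by
        intro y hy
        show (PySem.List.pyGet? (PySem.List.pySetD fac m _) y).getD PySem.Dict.empty = _
        rw [pvGet_set PySem.Dict.empty fac m _ y (by omega) hy]
        have hmr : m.toNat < fac.length := by
          rw [ihlen]; omega
        by_cases hym : y = m
        · rw [if_pos ⟨hym, hmr⟩, if_pos hym]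
        · rw [if_neg (by tauto), if_neg hym]; rfl
      refine ⟨?_, ?_, ?_⟩
      · show (PySem.List.pySetD fac m _).length = _
        rw [PySem.List.length_pySetD]
        exact ihlen
      · intro x hx hx2 hxm
        rcases Classical.em (x = m) with rfl | hne
        · rw [hsetget x hx, if_pos rfl]
          exact ⟨hMnodup, hMcont, hMgetD⟩
        · rw [hsetget x hx, if_neg hne]
          exact ihprops x hx hx2 (by omega)
      · intro x hx hcase
        rw [hsetget x hx, if_neg (by omega)]
        exact ihempty x hx (by omega)
  intro x hx hxn
  obtain ⟨hlen, hprops, hempty⟩ := main (n + 1) (by omega) (le_refl _)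
  rcases Classical.em (2 ≤ x) with h2x | h2x
  · exact hprops x hx h2x (by omega)
  · have he' : pvGetd (pvFAC n) x = PySem.Dict.empty := hempty x hx (by omega)
    rw [he']
    refine ⟨by rw [PySem.Dict.keys_empty]; exact List.nodup_nil, ?_, ?_⟩
    · intro p
      rw [PySem.Dict.contains_empty]
      constructor
      · intro hc; cases hc
      · intro hc; omega
    · intro p
      rw [pvCsum, PySem.List.pyRange_one_eq_nil (by omega), PySem.Dict.getD_empty]
      rfl


-- ---------- the canonical divisor product ----------

theorem pvFoldlMul {α : Type} (f : α → Int) (l : List α) (a : Int) :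
    l.foldl (fun t pe => t * f pe) a = a * (l.map f).prod := by
  induction l generalizing a with
  | nil => simp
  | cons x t ih => simp [ih, mul_assoc]

theorem pvDivisor_canonical (B : PySem.Dict Int Int) (hnd : B.keys.Nodup)
    (ps : List Int) (hpsnd : ps.Nodup) (hmem : ∀ p, B.contains p = true ↔ p ∈ ps)
    (ev : Int → Int) (hev : ∀ p, B.getD p 0 = ev p) (m : Int) :
    pvDivisor B m = ((ps.map (fun p => pvFactor m p (ev p))).prod) % m := by
  unfold pvDivisor
  rw [pvFoldlMul (fun pe : Int × Int => pvFactor m pe.1 pe.2) B.items 1, one_mul]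
  congr 1
  rw [PySem.Dict.items_eq_map_keys B hnd 0, List.map_map]
  have hfun : (fun k => pvFactor m k (ev k)) = ((fun pe : Int × Int => pvFactor m pe.1 pe.2) ∘ fun k => (k, B.getD k 0)) := by
    funext k
    simp [Function.comp, hev k]
  have hperm : B.keys.Perm ps := by
    rw [List.perm_ext_iff_of_nodup hnd hpsnd]
    intro a
    rw [← PySem.Dict.contains_iff_mem_keys]
    exact hmem a
  calc (B.keys.map ((fun pe : Int × Int => pvFactor m pe.1 pe.2) ∘ fun k => (k, B.getD k 0))).prod
      = (B.keys.map (fun k => pvFactor m k (ev k))).prod := by rw [hfun]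
    _ = (ps.map (fun k => pvFactor m k (ev k))).prod := (hperm.map _).prod_eq

theorem pvPrimesUpTo_nodup (pf : List (PySem.Dict Int Int)) (x : Int) :
    (pvPrimesUpTo pf x).Nodup :=
  (pvNodup_pyRange 2 (x + 1) (by omega)).filter _

theorem pvMem_primesUpTo (pf : List (PySem.Dict Int Int)) (x p : Int) :
    p ∈ pvPrimesUpTo pf x ↔ (2 ≤ p ∧ p ≤ x ∧ (pvGetd pf p).contains p = true) := by
  unfold pvPrimesUpTo
  rw [List.mem_filter, PySem.List.mem_pyRange_one]
  constructor
  · rintro ⟨⟨h1, h2⟩, h3⟩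
    exact ⟨h1, by omega, by simpa using h3⟩
  · rintro ⟨h1, h2, h3⟩
    exact ⟨⟨h1, by omega⟩, by simpa using h3⟩

def pvDval (n x : Int) : Int :=
  ((pvPrimesUpTo (pvPF n) x).map (fun p => pvFactor 1000000007 p (pvE (pvPF n) p x))).prod % 1000000007

def pvDSpec (n m x : Int) : Int :=
  if x = 1 then 1 else if x = 2 then 3 else if 3 ≤ x ∧ x < m then pvDval n x else 0

-- ---------- A's main loop ----------

theorem pvMain_facts (n : Int) (hn : 3 ≤ n) :
    ∀ m : Int, 3 ≤ m → m ≤ n + 1 →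
      (let st := (PySem.List.pyRange 3 m 1).foldl (pvMainStep n)
          (PySem.Dict.empty.insert 2 1,
           PySem.List.pySetD (PySem.List.pySetD (List.replicate (n + 1).toNat (0 : Int)) 1 1) 2 3);
       st.1.keys.Nodup ∧
       (∀ p, st.1.contains p = true ↔ pvOcc (pvPF n) p (m - 1)) ∧
       (∀ p, st.1.getD p 0 = pvE (pvPF n) p (m - 1)) ∧
       st.2.length = (n + 1).toNat ∧
       (∀ x : Int, 0 ≤ x → x ≤ n → pvGeti st.2 x = pvDSpec n m x)) := by
  obtain ⟨hlenPF, hkeyPF, hndPF, h2PF⟩ := pvSieve_facts (n + 1)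
  have h2pf : pvGetd (pvPF n) 2 = PySem.Dict.empty.insert 2 1 := h2PF (by omega) (by omega)
  have hg0 : ∀ p y : Int, 0 ≤ y → (pvGetd (pvPF n) y).contains p = false → pvGe (pvPF n) p y = 0 := by
    intro p y _ hc
    exact PySem.Dict.getD_of_not_contains _ _ hc
  have hcont2 : (pvGetd (pvPF n) 2).contains 2 = true := by
    rw [h2pf]; exact PySem.Dict.contains_insert_self _ _ _
  have hOcc2 : ∀ x : Int, 2 ≤ x → pvOcc (pvPF n) 2 x := by
    intro x hx
    exact ⟨2, by omega, hx, hcont2⟩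
  have hEz : ∀ p x : Int, 0 ≤ x → ¬ pvOcc (pvPF n) p x → (p ≠ 2 ∨ x < 2) → pvE (pvPF n) p x = 0 := by
    intro p x hx hno hp2
    unfold pvE
    have hind : ¬ (p = 2 ∧ 2 ≤ x) := by
      rintro ⟨rfl, hc⟩
      rcases hp2 with h | h
      · exact h rfl
      · omega
    rw [if_neg hind]
    have hz : ∀ z : Int, 2 ≤ z → z ≤ x → pvGe (pvPF n) p z = 0 := by
      intro z h1 h2'
      apply hg0 p z (by omega)
      by_contra hcc
      rw [Bool.not_eq_false] at hcc
      exact hno ⟨z, h1, h2', hcc⟩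
    have : ((PySem.List.pyRange 3 (x + 1) 1).map
        (fun y => y * pvGe (pvPF n) p y - pvCsum (pvPF n) p 2 y)).sum = 0 := by
      apply pvSum_zero
      intro y h3 hy
      rw [hz y (by omega) (by omega), pvCsum_zero _ _ _ _ (fun z hz1 hz2 => hz z hz1 (by omega))]
      ring
    rw [this]
    simp
  have hCz : ∀ p x : Int, ¬ pvOcc (pvPF n) p x → pvCsum (pvPF n) p 2 x = 0 := by
    intro p x hno
    apply pvCsum_zero
    intro y h1 h2'
    apply hg0 p y (by omega)
    by_contra hcc
    rw [Bool.not_eq_false] at hcc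
    exact hno ⟨y, h1, h2', hcc⟩
  intro m hm
  induction m, hm using Int.le_induction with
  | base =>
    intro _
    rw [PySem.List.pyRange_one_eq_nil (by omega)]
    simp only [List.foldl_nil]
    refine ⟨PySem.Dict.nodup_keys_insert _ _ _ (by rw [PySem.Dict.keys_empty]; exact List.nodup_nil),
            ?_, ?_, ?_, ?_⟩
    · intro p
      rw [PySem.Dict.contains_insert]
      constructor
      · intro hc
        have hp2 : p = 2 := by
          rcases Bool.or_eq_true_iff.mp hc with h | h
          · exact by simpa using h
          · rw [PySem.Dict.contains_empty] at h; cases h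
        subst hp2
        exact hOcc2 2 (by omega)
      · rintro ⟨z, hz1, hz2, hz3⟩
        have hz2' : z = 2 := by omega
        subst hz2'
        have := hkeyPF 2 p (by omega) hz3
        rw [h2pf, PySem.Dict.contains_insert] at hz3
        rcases Bool.or_eq_true_iff.mp hz3 with h | h
        · simp [show p = 2 from by simpa using h]
        · rw [PySem.Dict.contains_empty] at h; cases h
    · intro p
      rw [show (3:Int) - 1 = 2 by ring, pvE_two, PySem.Dict.getD_insert]
      by_cases hp : p = 2
      · rw [if_pos hp, if_pos hp]
      · rw [if_neg hp, if_neg hp, PySem.Dict.getD_empty]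
    · rw [PySem.List.length_pySetD, PySem.List.length_pySetD, List.length_replicate]
    · intro x hx hxn
      show (PySem.List.pyGet? _ _).getD 0 = _
      rw [pvGet_set 0 _ 2 3 x (by omega) hx, pvGet_set 0 _ 1 1 x (by omega) hx,
          pvGet_replicate 0 0 _ x hx]
      rw [PySem.List.length_pySetD, List.length_replicate]
      unfold pvDSpec
      by_cases hx2 : x = 2
      · rw [if_pos ⟨hx2, by omega⟩, hx2]
        norm_num
      · rw [if_neg (by tauto)]
        by_cases hx1 : x = 1
        · rw [if_pos ⟨hx1, by omega⟩, hx1]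
          norm_num
        · rw [if_neg (by tauto), if_neg hx1, if_neg hx2,
              if_neg (by omega : ¬ (3 ≤ x ∧ x < 3))]
          split <;> rfl
  | succ m hm ih =>
    intro hmn
    obtain ⟨ihnd, ihcont, ihgetd, ihlen, ihD⟩ := ih (by omega)
    rw [PySem.List.pyRange_one_succ_right (by omega : (3:Int) ≤ m), List.foldl_append,
        List.foldl_cons, List.foldl_nil]
    set st := (PySem.List.pyRange 3 m 1).foldl (pvMainStep n)
      (PySem.Dict.empty.insert 2 1,
       PySem.List.pySetD (PySem.List.pySetD (List.replicate (n + 1).toNat (0 : Int)) 1 1) 2 3) with hst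
    obtain ⟨facnd, faccont, facgetd⟩ := pvFAC_facts n hn m (by omega) (by omega)
    have hndfstPF : ((pvGetd (pvPF n) m).items.map Prod.fst).Nodup := hndPF m (by omega)
    have hndfstFAC : ((pvGetd (pvFAC n) m).items.map Prod.fst).Nodup := facnd
    have hkeysfstPF : ∀ p : Int, p ∈ (pvGetd (pvPF n) m).items.map Prod.fst
        ↔ (pvGetd (pvPF n) m).contains p = true := by
      intro p; rw [PySem.Dict.contains_iff_mem_keys]; rfl
    have hkeysfstFAC : ∀ p : Int, p ∈ (pvGetd (pvFAC n) m).items.map Prod.fst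
        ↔ (pvGetd (pvFAC n) m).contains p = true := by
      intro p; rw [PySem.Dict.contains_iff_mem_keys]; rfl
    have hB1 : (pvMainStep n st m).1 = pvUpsert (fun pv w => w - pv.2) (fun pv => pv.2)
        (pvUpsert (fun pv w => w + pv.2 * m) (fun pv => pv.2 * m) st.1 (pvGetd (pvPF n) m).items)
        (pvGetd (pvFAC n) m).items := rfl
    set B1 := pvUpsert (fun pv w => w + pv.2 * m) (fun pv => pv.2 * m) st.1 (pvGetd (pvPF n) m).items with hB1d
    set B2 := pvUpsert (fun pv w => w - pv.2) (fun pv => pv.2) B1 (pvGetd (pvFAC n) m).items with hB2d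
    have hB1nd : B1.keys.Nodup := pvUpsert_nodup _ _ _ _ ihnd
    have hB2nd : B2.keys.Nodup := pvUpsert_nodup _ _ _ _ hB1nd
    have hB1cont : ∀ p, B1.contains p = (st.1.contains p || decide (p ∈ (pvGetd (pvPF n) m).items.map Prod.fst)) :=
      fun p => pvUpsert_contains _ _ _ _ p
    have hB2cont : ∀ p, B2.contains p = true ↔ pvOcc (pvPF n) p m := by
      intro p
      rw [hB2d, pvUpsert_contains, Bool.or_eq_true, decide_eq_true_iff, hkeysfstFAC,
          hB1cont, Bool.or_eq_true, decide_eq_true_iff, hkeysfstPF, ihcont]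
      rw [faccont]
      constructor
      · rintro ((hOm1 | hpm) | ⟨_, hOm⟩)
        · obtain ⟨z, h1, h2', h3⟩ := hOm1
          exact ⟨z, h1, by omega, h3⟩
        · exact ⟨m, by omega, le_refl m, hpm⟩
        · exact hOm
      · intro hOm
        exact Or.inr ⟨by omega, hOm⟩
    have hB2getd : ∀ p, B2.getD p 0 = pvE (pvPF n) p m := by
      intro p
      have hEs : pvE (pvPF n) p m = pvE (pvPF n) p (m - 1) + (m * pvGe (pvPF n) p m - pvCsum (pvPF n) p 2 m) :=
        pvE_succ _ _ _ (by omega)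
      by_cases hOm : pvOcc (pvPF n) p m
      · -- p is a key of pf_fac[m]
        have hvFAC : (p, (pvGetd (pvFAC n) m).getD p 0) ∈ (pvGetd (pvFAC n) m).items :=
          pvMem_items_getD _ facnd p ((faccont p).mpr ⟨by omega, hOm⟩)
        rw [facgetd p] at hvFAC
        rw [hB2d, pvUpsert_getD_mem _ _ _ hndfstFAC _ _ _ hvFAC]
        by_cases hpm : (pvGetd (pvPF n) m).contains p = true
        · -- p divides m
          have hvPF : (p, pvGe (pvPF n) p m) ∈ (pvGetd (pvPF n) m).items :=
            pvMem_items_getD _ (hndPF m (by omega)) p hpm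
          have hB1c : B1.contains p = true := by
            rw [hB1cont, Bool.or_eq_true, decide_eq_true_iff, hkeysfstPF]
            exact Or.inr hpm
          rw [if_pos hB1c, hB1d, pvUpsert_getD_mem _ _ _ hndfstPF _ _ _ hvPF]
          by_cases hc : st.1.contains p = true
          · rw [if_pos hc, ihgetd p, hEs]
            ring
          · rw [if_neg hc, hEs]
            have hnoOm1 : ¬ pvOcc (pvPF n) p (m - 1) := fun hx => hc ((ihcont p).mpr hx)
            have hEprev : pvE (pvPF n) p (m - 1) = 0 := by
              apply hEz p (m - 1) (by omega) hnoOm1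
              left
              intro hp2
              subst hp2
              exact hnoOm1 (hOcc2 (m - 1) (by omega))
            rw [hEprev]
            ring
        · -- p does not divide m
          have hgm : pvGe (pvPF n) p m = 0 := hg0 p m (by omega) (by rw [Bool.not_eq_true] at hpm; exact hpm)
          have hnm : p ∉ (pvGetd (pvPF n) m).items.map Prod.fst := by
            rw [hkeysfstPF]; exact hpm
          have hOm1 : pvOcc (pvPF n) p (m - 1) := by
            obtain ⟨z, h1, h2', h3⟩ := hOm
            rcases Classical.em (z = m) with rfl | hne
            · exact absurd h3 hpm
            · exact ⟨z, h1, by omega, h3⟩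
          have hB1c : B1.contains p = true := by
            rw [hB1cont, Bool.or_eq_true]
            exact Or.inl ((ihcont p).mpr hOm1)
          rw [if_pos hB1c, hB1d, pvUpsert_getD_not_mem _ _ _ _ _ hnm, ihgetd p, hEs, hgm]
          ring
      · -- p is not a key anywhere up to m
        have hpm : (pvGetd (pvPF n) m).contains p = false := by
          by_contra hcc
          rw [Bool.not_eq_false] at hcc
          exact hOm ⟨m, by omega, le_refl m, hcc⟩
        have hnmPF : p ∉ (pvGetd (pvPF n) m).items.map Prod.fst := by
          rw [hkeysfstPF, hpm]; simp
        have hnmFAC : p ∉ (pvGetd (pvFAC n) m).items.map Prod.fst := by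
          rw [hkeysfstFAC]
          intro hcc
          exact hOm ((faccont p).mp hcc).2
        have hnoOm1 : ¬ pvOcc (pvPF n) p (m - 1) := by
          rintro ⟨z, h1, h2', h3⟩
          exact hOm ⟨z, h1, by omega, h3⟩
        rw [hB2d, pvUpsert_getD_not_mem _ _ _ _ _ hnmFAC, hB1d,
            pvUpsert_getD_not_mem _ _ _ _ _ hnmPF, ihgetd p, hEs,
            hg0 p m (by omega) hpm, hCz p m hOm]
        ring
    refine ⟨hB2nd, ?_, ?_, ?_, ?_⟩
    · intro p
      rw [hB1]
      rw [show m + 1 - 1 = m by ring]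
      exact hB2cont p
    · intro p
      rw [hB1]
      rw [show m + 1 - 1 = m by ring]
      exact hB2getd p
    · show (PySem.List.pySetD st.2 m _).length = _
      rw [PySem.List.length_pySetD]
      exact ihlen
    · intro x hx hxn
      show (PySem.List.pyGet? (PySem.List.pySetD st.2 m _) x).getD 0 = _
      rw [pvGet_set 0 st.2 m _ x (by omega) hx]
      have hmr : m.toNat < st.2.length := by rw [ihlen]; omega
      by_cases hxm : x = m
      · rw [if_pos ⟨hxm, hmr⟩]
        have hDv : pvDivisor B2 1000000007 = pvDval n m := by
          apply pvDivisor_canonical B2 hB2nd (pvPrimesUpTo (pvPF n) m) (pvPrimesUpTo_nodup _ _)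
            (fun p => by
              rw [hB2cont p, pvMem_primesUpTo]
              constructor
              · rintro ⟨z, h1, h2', h3⟩
                obtain ⟨hq1, hq2, _, hq4⟩ := hkeyPF z p (by omega) h3
                exact ⟨hq1, by omega, hq4⟩
              · rintro ⟨h1, h2', h3⟩
                exact ⟨p, h1, h2', h3⟩)
            (fun p => pvE (pvPF n) p m) hB2getd 1000000007
        subst hxm
        unfold pvDSpec
        rw [if_neg (by omega), if_neg (by omega), if_pos ⟨by omega, by omega⟩]
        exact hDv
      · rw [if_neg (by tauto)]
        have := ihD x hx hxn
        rw [show (PySem.List.pyGet? st.2 x).getD 0 = pvGeti st.2 x from rfl, this]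
        unfold pvDSpec
        by_cases hx1 : x = 1
        · rw [if_pos hx1, if_pos hx1]
        · rw [if_neg hx1, if_neg hx1]
          by_cases hx2 : x = 2
          · rw [if_pos hx2, if_pos hx2]
          · rw [if_neg hx2, if_neg hx2]
            by_cases hx3 : 3 ≤ x ∧ x < m
            · rw [if_pos hx3, if_pos ⟨hx3.1, by omega⟩]
            · rw [if_neg hx3, if_neg (by omega)]


-- ---------- B's primes dict ----------

theorem pvInsTrue_contains (l : List (Int × Int)) (pr : PySem.Dict Int Bool) (p : Int) :
    (l.foldl (fun pr pv => pr.insert pv.1 true) pr).contains p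
      = (pr.contains p || decide (p ∈ l.map Prod.fst)) := by
  induction l generalizing pr with
  | nil => simp
  | cons pv t ih =>
    simp only [List.foldl_cons]
    rw [ih, PySem.Dict.contains_insert]
    by_cases hpp : p = pv.1
    · subst hpp; simp [List.mem_cons]
    · have hfalse : (p == pv.1) = false := by simp [hpp]
      rw [hfalse]
      simp only [Bool.false_or]
      congr 1
      exact decide_eq_decide.mpr (by simp [List.mem_cons, hpp])

theorem pvPrimesDict_facts (n : Int) (hn : 3 ≤ n) :
    (pvPrimesDict n).keys.Nodup ∧
    (∀ p, p ∈ (pvPrimesDict n).keys ↔ pvOcc (pvPF n) p n) := by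
  have main : ∀ m : Int, 2 ≤ m → m ≤ n + 1 →
      (((PySem.List.pyRange 2 m 1).foldl
          (fun pr z => (pvGetd (pvPF n) z).items.foldl (fun pr pv => pr.insert pv.1 true) pr)
          (PySem.Dict.empty : PySem.Dict Int Bool)).keys.Nodup ∧
       (∀ p, ((PySem.List.pyRange 2 m 1).foldl
          (fun pr z => (pvGetd (pvPF n) z).items.foldl (fun pr pv => pr.insert pv.1 true) pr)
          (PySem.Dict.empty : PySem.Dict Int Bool)).contains p = true ↔ pvOcc (pvPF n) p (m - 1))) := by
    intro m hm
    induction m, hm using Int.le_induction with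
    | base =>
      intro _
      rw [PySem.List.pyRange_one_eq_nil (by omega)]
      simp only [List.foldl_nil]
      refine ⟨by rw [PySem.Dict.keys_empty]; exact List.nodup_nil, ?_⟩
      intro p
      rw [PySem.Dict.contains_empty]
      constructor
      · intro hc; cases hc
      · rintro ⟨z, h1, h2, _⟩; omega
    | succ m hm ih =>
      intro hmn
      obtain ⟨ihnd, ihcont⟩ := ih (by omega)
      rw [PySem.List.pyRange_one_succ_right (by omega : (2:Int) ≤ m), List.foldl_append,
          List.foldl_cons, List.foldl_nil]
      constructor
      · exact PySem.Dict.nodup_keys_foldl_insert_key _ Prod.fst (fun _ _ => true) _ ihnd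
      · intro p
        rw [pvInsTrue_contains, Bool.or_eq_true, decide_eq_true_iff, ihcont]
        have hkeys : p ∈ (pvGetd (pvPF n) m).items.map Prod.fst
            ↔ (pvGetd (pvPF n) m).contains p = true := by
          rw [PySem.Dict.contains_iff_mem_keys]; rfl
        rw [hkeys]
        constructor
        · rintro (⟨z, h1, h2, h3⟩ | hc)
          · exact ⟨z, h1, by omega, h3⟩
          · exact ⟨m, by omega, by omega, hc⟩
        · rintro ⟨z, h1, h2, h3⟩
          rcases Classical.em (z = m) with rfl | hne
          · exact Or.inr h3
          · exact Or.inl ⟨z, h1, by omega, h3⟩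
  obtain ⟨hnd, hcont⟩ := main (n + 1) (by omega) (le_refl _)
  refine ⟨hnd, ?_⟩
  intro p
  rw [← PySem.Dict.contains_iff_mem_keys]
  rw [show n + 1 - 1 = n by ring] at hcont
  exact hcont p

-- ---------- the per-prime exponent recurrence ----------

theorem pvE_step (pf : List (PySem.Dict Int Int)) (p m : Int) (hp : 2 ≤ p) (hpm : p ≤ m)
    (hglt : ∀ y, 0 ≤ y → y < p → pvGe pf p y = 0) (hg22 : p = 2 → pvGe pf 2 2 = 1) :
    pvE pf p m = pvE pf p (m - 1) + (m * pvGe pf p m - pvCsum pf p p m) := by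
  rcases Classical.em (3 ≤ m) with h3 | h3
  · rw [pvE_succ pf p m h3]
    have hsplit : pvCsum pf p 2 m = pvCsum pf p 2 (p - 1) + pvCsum pf p p m :=
      pvCsum_split pf p 2 p m (by omega) (by omega)
    have hzero : pvCsum pf p 2 (p - 1) = 0 :=
      pvCsum_zero pf p 2 (p - 1) (fun y h1 h2 => hglt y (by omega) (by omega))
    rw [hsplit, hzero]
    ring
  · have hm2 : m = 2 := by omega
    have hp2 : p = 2 := by omega
    subst hm2; subst hp2
    rw [pvE_two, if_pos rfl, show (2:Int) - 1 = 1 by ring]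
    rw [pvE_zero pf 2 1 (fun y hy1 hy2 => hglt y hy1 hy2) (by omega) (by omega) (fun _ => by omega)]
    rw [pvCsum_succ pf 2 2 2 (by omega), show (2:Int) - 1 = 1 by ring,
        pvCsum, PySem.List.pyRange_one_eq_nil (by omega)]
    rw [hg22 rfl]
    norm_num

-- ---------- B's inner loop ----------

theorem pvInner_facts (n p : Int) (hn : 3 ≤ n) (hp : 2 ≤ p) (hpn : p ≤ n)
    (hglt : ∀ y, 0 ≤ y → y < p → pvGe (pvPF n) p y = 0)
    (hg22 : p = 2 → pvGe (pvPF n) 2 2 = 1) :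
    ∀ m : Int, p ≤ m → m ≤ n + 1 → ∀ sig : List Int, sig.length = (n + 1).toNat →
      (let st := (PySem.List.pyRange p m 1).foldl (pvInnerStep n p) (sig, 0, 0);
       st.1.length = (n + 1).toNat ∧
       st.2.1 = pvCsum (pvPF n) p p (m - 1) ∧
       st.2.2 = pvE (pvPF n) p (m - 1) ∧
       (∀ x : Int, 0 ≤ x → pvGeti st.1 x =
         if p ≤ x ∧ x < m then
           PySem.Int.mod (pvGeti sig x * pvFactor 1000000007 p (pvE (pvPF n) p x)) 1000000007
         else pvGeti sig x)) := by
  intro m hm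
  induction m, hm using Int.le_induction with
  | base =>
    intro _ sig hsig
    rw [PySem.List.pyRange_one_eq_nil (by omega)]
    simp only [List.foldl_nil]
    refine ⟨hsig, ?_, ?_, ?_⟩
    · rw [pvCsum, PySem.List.pyRange_one_eq_nil (by omega)]
      rfl
    · rw [pvE_zero (pvPF n) p (p - 1) hglt (by omega) (by omega) (fun h => by omega)]
    · intro x hx
      rw [if_neg (by omega)]
  | succ m hm ih =>
    intro hmn sig hsig
    obtain ⟨ihlen, ihc, ihe, ihsig⟩ := ih (by omega) sig hsig
    rw [PySem.List.pyRange_one_succ_right (by omega : p ≤ m), List.foldl_append,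
        List.foldl_cons, List.foldl_nil]
    set st := (PySem.List.pyRange p m 1).foldl (pvInnerStep n p) (sig, 0, 0) with hstd
    have hv : (pvGetd (pvPF n) m).getD p 0 = pvGe (pvPF n) p m := rfl
    have hc' : st.2.1 + pvGe (pvPF n) p m = pvCsum (pvPF n) p p m := by
      rw [ihc, ← pvCsum_succ (pvPF n) p p m (by omega)]
    have he' : st.2.2 + m * pvGe (pvPF n) p m - (st.2.1 + pvGe (pvPF n) p m)
        = pvE (pvPF n) p m := by
      rw [ihe, ihc, ← pvCsum_succ (pvPF n) p p m (by omega)]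
      rw [pvE_step (pvPF n) p m hp (by omega) hglt hg22]
      ring
    have hstep1 : (pvInnerStep n p st m).1
        = PySem.List.pySetD st.1 m
            (PySem.Int.mod (pvGeti st.1 m * pvFactor 1000000007 p
              (st.2.2 + m * (pvGetd (pvPF n) m).getD p 0 - (st.2.1 + (pvGetd (pvPF n) m).getD p 0)))
              1000000007) := rfl
    refine ⟨?_, ?_, ?_, ?_⟩
    · rw [hstep1, PySem.List.length_pySetD]
      exact ihlen
    · show st.2.1 + (pvGetd (pvPF n) m).getD p 0 = _
      rw [hv, hc', show m + 1 - 1 = m by ring]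
    · show st.2.2 + m * (pvGetd (pvPF n) m).getD p 0 - (st.2.1 + (pvGetd (pvPF n) m).getD p 0) = _
      rw [hv, show m + 1 - 1 = m by ring]
      exact he'
    · intro x hx
      rw [hstep1]
      show (PySem.List.pyGet? (PySem.List.pySetD st.1 m _) x).getD 0 = _
      rw [pvGet_set 0 st.1 m _ x (by omega) hx]
      have hmr : m.toNat < st.1.length := by rw [ihlen]; omega
      by_cases hxm : x = m
      · subst hxm
        rw [if_pos ⟨rfl, hmr⟩, if_pos ⟨by omega, by omega⟩]
        have hnot : ¬ (p ≤ x ∧ x < x) := by omega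
        have hold : pvGeti st.1 x = pvGeti sig x := by
          rw [ihsig x hx, if_neg hnot]
        show PySem.Int.mod (pvGeti st.1 x * _) 1000000007 = _
        rw [hold]; rw [hv]; rw [he']
      · rw [if_neg (by tauto)]
        rw [show (PySem.List.pyGet? st.1 x).getD 0 = pvGeti st.1 x from rfl, ihsig x hx]
        by_cases hc : p ≤ x ∧ x < m
        · rw [if_pos hc, if_pos ⟨hc.1, by omega⟩]
        · rw [if_neg hc, if_neg (by omega)]


-- ---------- folding (· * f) % M over a list ----------

theorem pvFoldMulMod (fs : List Int) (a : Int) :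
    fs.foldl (fun t f => PySem.Int.mod (t * f) 1000000007) (PySem.Int.mod a 1000000007)
      = PySem.Int.mod (a * fs.prod) 1000000007 := by
  induction fs generalizing a with
  | nil => rw [List.foldl_nil, List.prod_nil, mul_one]
  | cons f t ih =>
    rw [List.foldl_cons]
    have hM : (0:Int) < 1000000007 := by norm_num
    have hstep : PySem.Int.mod (PySem.Int.mod a 1000000007 * f) 1000000007
        = PySem.Int.mod (a * f) 1000000007 := by
      rw [PySem.Int.mod_eq_emod_of_pos hM, PySem.Int.mod_eq_emod_of_pos hM,
          PySem.Int.mod_eq_emod_of_pos hM]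
      conv_rhs => rw [Int.mul_emod]
      rw [Int.mul_emod (a % 1000000007) f]
      rw [Int.emod_emod_of_dvd _ (dvd_refl _)]
    rw [hstep, ih (a * f), List.prod_cons]
    ring_nf

-- ---------- B's outer loop over the primes ----------

theorem pvOuter_facts (n : Int) (hn : 3 ≤ n) :
    ∀ l : List Int,
      (∀ p ∈ l, 2 ≤ p ∧ p ≤ n ∧ (pvGetd (pvPF n) p).contains p = true) →
      ∀ sig : List Int, sig.length = (n + 1).toNat →
      ((l.foldl (fun sig p => ((PySem.List.pyRange p (n + 1) 1).foldl (pvInnerStep n p) (sig, 0, 0)).1) sig).length = (n + 1).toNat ∧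
       (∀ x : Int, 0 ≤ x → x ≤ n →
        pvGeti (l.foldl (fun sig p => ((PySem.List.pyRange p (n + 1) 1).foldl (pvInnerStep n p) (sig, 0, 0)).1) sig) x
          = ((l.filter (fun p => decide (p ≤ x))).map
              (fun p => pvFactor 1000000007 p (pvE (pvPF n) p x))).foldl
              (fun a f => PySem.Int.mod (a * f) 1000000007) (pvGeti sig x))) := by
  obtain ⟨hlenPF, hkeyPF, hndPF, h2PF⟩ := pvSieve_facts (n + 1)
  have h2pf : pvGetd (pvPF n) 2 = PySem.Dict.empty.insert 2 1 := h2PF (by omega) (by omega)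
  intro l
  induction l with
  | nil =>
    intro _ sig hsig
    exact ⟨hsig, fun x _ _ => rfl⟩
  | cons p t ih =>
    intro hprops sig hsig
    obtain ⟨hp2, hpn, hppc⟩ := hprops p (by simp)
    have hglt : ∀ y, 0 ≤ y → y < p → pvGe (pvPF n) p y = 0 := by
      intro y hy hyp
      apply PySem.Dict.getD_of_not_contains
      by_contra hcc
      rw [Bool.not_eq_false] at hcc
      have := hkeyPF y p hy hcc
      omega
    have hg22 : p = 2 → pvGe (pvPF n) 2 2 = 1 := by
      intro _
      show (pvGetd (pvPF n) 2).getD 2 0 = 1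
      rw [h2pf, PySem.Dict.getD_insert, if_pos rfl]
    have hinner := pvInner_facts n p hn hp2 hpn hglt hg22 (n + 1) (by omega) (le_refl _) sig hsig
    obtain ⟨hilen, _, _, hisig⟩ := hinner
    simp only [List.foldl_cons]
    obtain ⟨ihlen, ihsig⟩ := ih (fun q hq => hprops q (by simp [hq]))
      ((PySem.List.pyRange p (n + 1) 1).foldl (pvInnerStep n p) (sig, 0, 0)).1 hilen
    refine ⟨ihlen, ?_⟩
    intro x hx hxn
    rw [ihsig x hx hxn, hisig x hx]
    by_cases hpx : p ≤ x
    · rw [if_pos ⟨hpx, by omega⟩, List.filter_cons, if_pos (by simpa using hpx), List.map_cons,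
          List.foldl_cons]
    · rw [if_neg (by omega), List.filter_cons, if_neg (by simpa using hpx)]

-- ---------- the final per-index value of B's sig array ----------

theorem pvSig_facts (n : Int) (hn : 3 ≤ n) :
    (pvSig n).length = (n + 1).toNat ∧
    (∀ x : Int, 1 ≤ x → x ≤ n → pvGeti (pvSig n) x = pvDSpec n (n + 1) x) := by
  obtain ⟨hlenPF, hkeyPF, hndPF, h2PF⟩ := pvSieve_facts (n + 1)
  have h2pf : pvGetd (pvPF n) 2 = PySem.Dict.empty.insert 2 1 := h2PF (by omega) (by omega)
  have hcont2 : (pvGetd (pvPF n) 2).contains 2 = true := by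
    rw [h2pf]; exact PySem.Dict.contains_insert_self _ _ _
  obtain ⟨hKnd, hKmem⟩ := pvPrimesDict_facts n hn
  have hprops : ∀ p ∈ (pvPrimesDict n).keys, 2 ≤ p ∧ p ≤ n ∧ (pvGetd (pvPF n) p).contains p = true := by
    intro p hp
    obtain ⟨z, h1, h2', h3⟩ := (hKmem p).mp hp
    obtain ⟨hq1, hq2, _, hq4⟩ := hkeyPF z p (by omega) h3
    exact ⟨hq1, by omega, hq4⟩
  have hsig0 : (List.replicate (n + 1).toNat (1:Int)).length = (n + 1).toNat := by simp
  have houter := pvOuter_facts n hn (pvPrimesDict n).keys hprops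
    (List.replicate (n + 1).toNat (1:Int)) hsig0
  have hlen : (pvSig n).length = (n + 1).toNat := houter.1
  refine ⟨hlen, ?_⟩
  intro x hx1 hxn
  have hget1 : pvGeti (List.replicate (n + 1).toNat (1:Int)) x = 1 := by
    show (PySem.List.pyGet? _ _).getD 0 = 1
    rw [pvGet_replicate 0 1 _ x (by omega)]
    rw [if_pos (by omega)]
  have hval : pvGeti (pvSig n) x
      = (((pvPrimesDict n).keys.filter (fun p => decide (p ≤ x))).map
          (fun p => pvFactor 1000000007 p (pvE (pvPF n) p x))).foldl
          (fun a f => PySem.Int.mod (a * f) 1000000007) 1 := by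
    have := houter.2 x (by omega) hxn
    rw [hget1] at this
    exact this
  -- the filtered key list is (as a set) the canonical prime list up to x
  have hfmem : ∀ q : Int, q ∈ (pvPrimesDict n).keys.filter (fun p => decide (p ≤ x))
      ↔ q ∈ pvPrimesUpTo (pvPF n) x := by
    intro q
    rw [List.mem_filter, pvMem_primesUpTo, decide_eq_true_iff]
    constructor
    · rintro ⟨hq, hqx⟩
      obtain ⟨hq1, hq2, hq3⟩ := hprops q hq
      exact ⟨hq1, hqx, hq3⟩
    · rintro ⟨hq1, hq2, hq3⟩
      refine ⟨(hKmem q).mpr ⟨q, hq1, by omega, hq3⟩, hq2⟩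
  have hperm : ((pvPrimesDict n).keys.filter (fun p => decide (p ≤ x))).Perm (pvPrimesUpTo (pvPF n) x) := by
    rw [List.perm_ext_iff_of_nodup (hKnd.filter _) (pvPrimesUpTo_nodup _ _)]
    exact hfmem
  have hone : (1 : Int) = PySem.Int.mod 1 1000000007 := by decide
  rw [hval, hone, pvFoldMulMod, one_mul]
  have hprod : (((pvPrimesDict n).keys.filter (fun p => decide (p ≤ x))).map
      (fun p => pvFactor 1000000007 p (pvE (pvPF n) p x))).prod
      = ((pvPrimesUpTo (pvPF n) x).map (fun p => pvFactor 1000000007 p (pvE (pvPF n) p x))).prod :=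
    (hperm.map _).prod_eq
  rw [hprod]
  have hM : (0:Int) < 1000000007 := by norm_num
  rw [PySem.Int.mod_eq_emod_of_pos hM]
  unfold pvDSpec
  by_cases hx1' : x = 1
  · subst hx1'
    rw [if_pos rfl]
    have hnil : pvPrimesUpTo (pvPF n) 1 = [] := by
      unfold pvPrimesUpTo
      rw [PySem.List.pyRange_one_eq_nil (by omega)]
      rfl
    rw [hnil, List.map_nil, List.prod_nil]
    decide
  · rw [if_neg hx1']
    by_cases hx2' : x = 2
    · subst hx2'
      rw [if_pos rfl]
      have hsingle : pvPrimesUpTo (pvPF n) 2 = [2] := by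
        have hmem : ∀ a : Int, a ∈ pvPrimesUpTo (pvPF n) 2 ↔ a = 2 := by
          intro a
          rw [pvMem_primesUpTo]
          constructor
          · rintro ⟨h1, h2', _⟩; omega
          · rintro rfl; exact ⟨by omega, by omega, hcont2⟩
        rw [← List.perm_singleton, List.perm_ext_iff_of_nodup (pvPrimesUpTo_nodup _ _) (List.nodup_singleton 2)]
        intro a
        rw [hmem a, List.mem_singleton]
      rw [hsingle, List.map_singleton, pvE_two, if_pos rfl, List.prod_singleton]
      decide
    · rw [if_neg hx2', if_pos ⟨by omega, by omega⟩]
      rfl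

-- ---------- turning a pointwise description into a sum ----------

theorem pvSumList (xs : List Int) (n : Int) (hn : 0 ≤ n) (hlen : xs.length = (n + 1).toNat)
    (F : Int → Int) (hF : ∀ x : Int, 0 ≤ x → x ≤ n → pvGeti xs x = F x) :
    xs.sum = ((PySem.List.pyRange 0 (n + 1) 1).map F).sum := by
  have hcast : ((xs.length : Int)) = n + 1 := by rw [hlen]; omega
  have hx := PySem.List.map_pyGetD_pyRange_zero' xs 0
  rw [hcast] at hx
  conv_lhs => rw [← hx]
  apply congrArg
  apply List.map_congr_left
  intro j hj
  have hjm := (PySem.List.mem_pyRange_one).mp hj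
  rw [show PySem.List.pyGetD xs j 0 = pvGeti xs j from rfl]
  exact hF j hjm.1 (by omega)

theorem pvSumDrop (xs : List Int) (n : Int) (hn : 0 ≤ n) (hlen : xs.length = (n + 1).toNat)
    (F : Int → Int) (hF : ∀ x : Int, 1 ≤ x → x ≤ n → pvGeti xs x = F x) :
    (xs.drop 1).sum = ((PySem.List.pyRange 1 (n + 1) 1).map F).sum := by
  have hcast : (PySem.List.len xs) = n + 1 := by
    rw [show PySem.List.len xs = (xs.length : Int) from by simp [PySem.List.len_eq], hlen]; omega
  have hx := PySem.List.map_pyGetD_pyRange xs 0 (by omega : (0:Int) ≤ 1)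
  rw [hcast] at hx
  rw [show ((1:Int).toNat) = 1 from rfl] at hx
  conv_lhs => rw [← hx]
  apply congrArg
  apply List.map_congr_left
  intro j hj
  have hjm := (PySem.List.mem_pyRange_one).mp hj
  rw [show PySem.List.pyGetD xs j 0 = pvGeti xs j from rfl]
  exact hF j hjm.1 (by omega)

-- ===== VERDICT (by name: the statement is the Claim_ definition above) =====
theorem S_spec : Claim_equal_S := by
  unfold Claim_equal_S
  intro n hdom hpre
  unfold Spec_S
  by_cases h1 : n = 1
  · subst h1; decide
  by_cases h2 : n = 2
  · subst h2; decide
  have hn : 3 ≤ n := by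
    unfold Pre_S at hpre; omega
  rw [pvS_eq n h1 h2, pvSalt_eq n]
  obtain ⟨_, _, _, hDlen0, hD0⟩ := pvMain_facts n hn (n + 1) (by omega) (le_refl _)
  have hDlen : (pvMain n).2.length = (n + 1).toNat := hDlen0
  have hD : ∀ x : Int, 0 ≤ x → x ≤ n → pvGeti (pvMain n).2 x = pvDSpec n (n + 1) x := hD0
  obtain ⟨hSlen, hSval⟩ := pvSig_facts n hn
  have hfold : ∀ l : List Int, l.foldl (· + ·) 0 = l.sum := fun l => (List.sum_eq_foldl).symm
  have hslice : PySem.List.slice (pvSig n) (some 1) none = (pvSig n).drop 1 :=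
    PySem.List.slice_from _ (by omega)
  rw [hslice, hfold ((pvMain n).2), hfold ((pvSig n).drop 1)]
  rw [pvSumList (pvMain n).2 n (by omega) hDlen _ hD,
      pvSumDrop (pvSig n) n (by omega) hSlen _ hSval]
  rw [PySem.List.pyRange_one_cons (by omega : (0:Int) < n + 1), List.map_cons, List.sum_cons]
  have h0 : pvDSpec n (n + 1) 0 = 0 := by
    unfold pvDSpec
    rw [if_neg (by omega), if_neg (by omega), if_neg (by omega)]
  rw [h0, zero_add, show (0:Int) + 1 = 1 from rfl]
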